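-- pv_equiv track=rewrite | github.com/YanZisuka/ALgorithm_sTUDY | HanSeungJae/kakao_2022_intern_05.py | solution
-- ===== SOURCE A (Python) =====
-- from collections import deque
--
-- def solution(rc, operations):
--
--     def shift_row(rc):
--         rc = deque(rc)
--         tmp = rc.pop()
--         rc.appendleft(tmp)
--         return list(rc)
--
--     def rotate(rc):
--         i, j = 0, 0
--         tmp = rc[i][j]
--         for _ in range(m-1):
--             j += 1
--             tmp, rc[i][j] = rc[i][j], tmp
--         for _ in range(n-1):
--             i += 1
--             tmp, rc[i][j] = rc[i][j], tmp
--         for _ in range(m-1):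
--             j -= 1
--             tmp, rc[i][j] = rc[i][j], tmp
--         for _ in range(n-1):
--             i -= 1
--             tmp, rc[i][j] = rc[i][j], tmp
--         return rc
--
--     n = len(rc)
--     m = len(rc[0])
--
--     for operation in operations:
--         if operation == 'Rotate':
--             rc = rotate(rc)
--         elif operation == 'ShiftRow':
--             rc = shift_row(rc)
--
--     return rc
-- ===== SOURCE B (Python) =====
-- def solution(rc, operations):
--     n, m = len(rc), len(rc[0])
--     # border positions once, in clockwise order starting at the top-left corner
--     ring = [(0, j) for j in range(m)]
--     ring += [(i, m - 1) for i in range(1, n)]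
--     if n > 1:
--         ring += [(n - 1, j) for j in range(m - 2, -1, -1)]
--     if m > 1:
--         ring += [(i, 0) for i in range(n - 2, 0, -1)]
--     for op in operations:
--         if op == 'Rotate':
--             vals = [rc[i][j] for i, j in ring]
--             vals = vals[-1:] + vals[:-1]
--             for (i, j), v in zip(ring, vals):
--                 rc[i][j] = v
--         elif op == 'ShiftRow':
--             rc = rc[-1:] + rc[:-1]
--     return rc
-- ===== Notes on version B (the rewrite author's own statement) =====
-- stated objective: alternative
-- what changed: A walks the border four times with an in-place swap-carry loop per Rotate and uses a deque for ShiftRow; B precomputes the border ring positions once, implements Rotate as read-all-border-values / rotate-the-value-list-by-one / write-back, and ShiftRow as list slicing.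
-- outside the precondition, e.g. on solution([[1, 2, 3]], ['Rotate']): A returns [[1, 3, 2]], B returns [[3, 1, 2]]; on solution([[1], [2], [3]], ['Rotate']): A returns [[1], [3], [2]], B returns [[3], [1], [2]]
import Mathlib
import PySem

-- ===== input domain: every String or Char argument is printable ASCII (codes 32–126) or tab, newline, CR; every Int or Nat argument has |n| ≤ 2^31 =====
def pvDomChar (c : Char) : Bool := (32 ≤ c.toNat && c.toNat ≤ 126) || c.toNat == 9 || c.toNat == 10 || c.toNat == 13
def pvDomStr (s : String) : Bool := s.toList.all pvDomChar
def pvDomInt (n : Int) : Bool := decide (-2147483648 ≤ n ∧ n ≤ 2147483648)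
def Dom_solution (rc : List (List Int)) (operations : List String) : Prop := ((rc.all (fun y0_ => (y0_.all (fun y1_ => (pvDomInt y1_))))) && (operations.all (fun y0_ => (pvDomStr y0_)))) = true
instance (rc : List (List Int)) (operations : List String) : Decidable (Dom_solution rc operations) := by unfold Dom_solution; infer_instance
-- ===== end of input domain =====

-- Header: B replaces A's four in-place swap-carry border walks per 'Rotate' by one precomputed
-- border-ring position list, reading the border values, rotating that value list by one and
-- writing it back; 'ShiftRow' becomes slicing.  Equivalence is about the RETURN value only
-- (the Python A mutates the rows of its argument in place; the Python B mutates them likewise).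

-- rc[i][j] read; indices are in range on every input admitted by Pre_ (exact there).
def pvRead (g : List (List Int)) (i j : Nat) : Int := (g.getD i []).getD j 0

-- rc[i][j] = v write; in range on every input admitted by Pre_ (exact there).
def pvWrite (g : List (List Int)) (i j : Nat) (v : Int) : List (List Int) :=
  g.set i ((g.getD i []).set j v)

-- ===== PORT A =====
-- the four 'for _ in range(..)' loops of rotate, each carrying (rc, i, j, tmp);
-- i, j are Nat: in A they start at 0 and stay within [0, n) × [0, m) on every input Pre_ admits.
def goRight : Nat → List (List Int) × Nat × Nat × Int → List (List Int) × Nat × Nat × Int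
  | 0, s => s
  | k+1, (g, i, j, tmp) => goRight k (pvWrite g i (j+1) tmp, i, j+1, pvRead g i (j+1))

def goDown : Nat → List (List Int) × Nat × Nat × Int → List (List Int) × Nat × Nat × Int
  | 0, s => s
  | k+1, (g, i, j, tmp) => goDown k (pvWrite g (i+1) j tmp, i+1, j, pvRead g (i+1) j)

def goLeft : Nat → List (List Int) × Nat × Nat × Int → List (List Int) × Nat × Nat × Int
  | 0, s => s
  | k+1, (g, i, j, tmp) => goLeft k (pvWrite g i (j-1) tmp, i, j-1, pvRead g i (j-1))

def goUp : Nat → List (List Int) × Nat × Nat × Int → List (List Int) × Nat × Nat × Int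
  | 0, s => s
  | k+1, (g, i, j, tmp) => goUp k (pvWrite g (i-1) j tmp, i-1, j, pvRead g (i-1) j)

def rotateA (n m : Nat) (g : List (List Int)) : List (List Int) :=
  let s1 := goRight (m-1) (g, 0, 0, pvRead g 0 0)
  let s2 := goDown (n-1) s1
  let s3 := goLeft (m-1) s2
  let s4 := goUp (n-1) s3
  s4.1

-- deque(rc); tmp = rc.pop(); rc.appendleft(tmp)  (exact for nonempty rc, which Pre_ guarantees)
def shiftRowA (g : List (List Int)) : List (List Int) := g.getLastD [] :: g.dropLast

def solution (rc : List (List Int)) (operations : List String) : List (List Int) :=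
  let n := rc.length
  let m := (rc.headD []).length
  operations.foldl
    (fun g op => if op = "Rotate" then rotateA n m g
                 else if op = "ShiftRow" then shiftRowA g else g) rc

-- ===== PORT B =====
-- the border ring positions, clockwise from the top-left corner (built once, as in Source B);
-- each Python range is transliterated over Nat (all its elements are ≥ 0 whenever it is nonempty).
def ringB (n m : Nat) : List (Nat × Nat) :=
  (List.range m).map (fun j => ((0 : Nat), j))
  ++ (List.range (n-1)).map (fun i => (i+1, m-1))
  ++ (if 1 < n then ((List.range (m-1)).reverse).map (fun j => (n-1, j)) else [])
  ++ (if 1 < m then (((List.range (n-2)).map (fun i => i+1)).reverse).map (fun i => (i, (0 : Nat))) else [])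

-- vals = [rc[i][j] ...]; vals = vals[-1:] + vals[:-1]; write back along the ring
def rotB (ring : List (Nat × Nat)) (g : List (List Int)) : List (List Int) :=
  let vals := ring.map (fun p => pvRead g p.1 p.2)
  let vals2 := vals.drop (vals.length - 1) ++ vals.dropLast
  (ring.zip vals2).foldl (fun h pv => pvWrite h pv.1.1 pv.1.2 pv.2) g

def solution_alt (rc : List (List Int)) (operations : List String) : List (List Int) :=
  let n := rc.length
  let m := (rc.headD []).length
  let ring := ringB n m
  operations.foldl
    (fun g op => if op = "Rotate" then rotB ring g
                 else if op = "ShiftRow" then g.drop (g.length - 1) ++ g.dropLast else g) rc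

-- ===== PRECONDITION & SPEC =====
-- Pre_ excludes (i) the inputs where the Python A raises: rc = [] (len(rc[0]) IndexError) and,
-- when a 'Rotate' occurs, an empty first row or a row shorter than len(rc[0]) (IndexError inside
-- rotate); and (ii) degenerate single-row (1×m, m ≥ 3) / single-column (n×1, n ≥ 3) matrices with
-- a 'Rotate': the problem this code solves states n,m ≥ 2, a border rotation is not well defined
-- on such a matrix, and A's double-visit walk result and B's cyclic-shift result are two
-- arbitrary choices there.
def Pre_solution (rc : List (List Int)) (operations : List String) : Prop :=
  rc ≠ [] ∧ ("Rotate" ∈ operations →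
    1 ≤ (rc.headD []).length ∧ (∀ r ∈ rc, (rc.headD []).length ≤ r.length) ∧
    ¬(rc.length = 1 ∧ 3 ≤ (rc.headD []).length) ∧
    ¬((rc.headD []).length = 1 ∧ 3 ≤ rc.length))
instance (rc : List (List Int)) (operations : List String) : Decidable (Pre_solution rc operations) := by
  unfold Pre_solution; infer_instance

def pvWitness_solution : List (List Int) × List String := ([[1, 2], [3, 4]], ["Rotate", "ShiftRow"])

def Spec_solution (rc : List (List Int)) (operations : List String) (out : List (List Int)) : Prop :=
  out = solution_alt rc operations
instance (rc : List (List Int)) (operations : List String) (out : List (List Int)) : Decidable (Spec_solution rc operations out) := by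
  unfold Spec_solution; infer_instance

-- ===== CLAIM (what is proved, stated in full; the proofs are below) =====
def Claim_equal_solution : Prop := ∀ (rc : List (List Int)) (operations : List String), Dom_solution rc operations → Pre_solution rc operations → Spec_solution rc operations (solution rc operations)

-- ===== LEMMAS AND PROOFS =====

-- generic write machinery
def writes (l : List ((Nat × Nat) × Int)) (g : List (List Int)) : List (List Int) :=
  l.foldl (fun h pv => pvWrite h pv.1.1 pv.1.2 pv.2) g

def walk : List (Nat × Nat) → Int → List (List Int) → List (List Int) × Int
  | [], t, g => (g, t)
  | p :: ps, t, g => walk ps (pvRead g p.1 p.2) (pvWrite g p.1 p.2 t)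

def posR (i j k : Nat) : List (Nat × Nat) := (List.range k).map (fun d => (i, j+1+d))
def posD (i j k : Nat) : List (Nat × Nat) := (List.range k).map (fun d => (i+1+d, j))
def posL (i j k : Nat) : List (Nat × Nat) := (List.range k).map (fun d => (i, j-1-d))
def posU (i j k : Nat) : List (Nat × Nat) := (List.range k).map (fun d => (i-1-d, j))

def pathA (n m : Nat) : List (Nat × Nat) :=
  posR 0 0 (m-1) ++ posD 0 (m-1) (n-1) ++ posL (n-1) (m-1) (m-1) ++ posU (n-1) 0 (n-1)

def tailB (n m : Nat) : List (Nat × Nat) :=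
  (List.range (m-1)).map (fun j => ((0 : Nat), j+1))
  ++ (List.range (n-1)).map (fun i => (i+1, m-1))
  ++ (if 1 < n then ((List.range (m-1)).reverse).map (fun j => (n-1, j)) else [])
  ++ (if 1 < m then (((List.range (n-2)).map (fun i => i+1)).reverse).map (fun i => (i, (0 : Nat))) else [])

-- basic getD/set facts
theorem getD_pvWrite (g : List (List Int)) (i j : Nat) (v : Int) (a : Nat) :
    (pvWrite g i j v).getD a [] =
      if i = a ∧ i < g.length then (g.getD i []).set j v else g.getD a [] := by
  unfold pvWrite List.getD
  rw [List.getElem?_set]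
  split_ifs with h1 h2 h3 h4 <;> simp_all

theorem pvRead_pvWrite_ne (g : List (List Int)) (p q : Nat × Nat) (v : Int) (h : p ≠ q) :
    pvRead (pvWrite g q.1 q.2 v) p.1 p.2 = pvRead g p.1 p.2 := by
  unfold pvRead
  rw [getD_pvWrite]
  split_ifs with h1
  · have hq : q.1 = p.1 := h1.1
    have hne : q.2 ≠ p.2 := by
      intro h2; exact h (Prod.ext (hq.symm) (h2.symm))
    rw [hq]
    unfold List.getD
    rw [List.getElem?_set]
    simp [hne]
  · rfl

theorem pvWrite_comm (g : List (List Int)) (p q : Nat × Nat) (v w : Int) (h : p ≠ q) :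
    pvWrite (pvWrite g p.1 p.2 v) q.1 q.2 w = pvWrite (pvWrite g q.1 q.2 w) p.1 p.2 v := by
  have hgd1 := getD_pvWrite g p.1 p.2 v q.1
  have hgd2 := getD_pvWrite g q.1 q.2 w p.1
  simp only [pvWrite] at hgd1 hgd2 ⊢
  rw [hgd1, hgd2]
  by_cases hr : p.1 = q.1
  · have hc : p.2 ≠ q.2 := fun h2 => h (Prod.ext hr h2)
    by_cases hl : p.1 < g.length
    · rw [if_pos ⟨hr, hl⟩, if_pos ⟨hr.symm, hr ▸ hl⟩]
      rw [← hr, List.set_set, List.set_set, List.set_comm _ _ hc]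
    · rw [if_neg (fun hh => hl hh.2), if_neg (fun hh => hl (hr ▸ hh.2))]
      have e1 : ∀ (r : List Int), List.set g p.1 r = g :=
        fun r => List.set_eq_of_length_le (by omega)
      have e2 : ∀ (r : List Int), List.set g q.1 r = g :=
        fun r => List.set_eq_of_length_le (by rw [← hr]; omega)
      have e3 : ∀ (gg : List (List Int)) (r : List Int), gg.length = g.length →
          List.set gg p.1 r = gg := fun gg r hlen => List.set_eq_of_length_le (by omega)
      have e4 : ∀ (gg : List (List Int)) (r : List Int), gg.length = g.length →
          List.set gg q.1 r = gg := fun gg r hlen => List.set_eq_of_length_le (by rw [hlen, ← hr]; omega)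
      rw [e4 _ _ (by simp), e1, e3 _ _ (by simp), e2]
  · rw [if_neg (fun hh => hr hh.1), if_neg (fun hh => hr hh.1.symm)]
    exact List.set_comm _ _ hr

theorem length_pvWrite (g : List (List Int)) (i j : Nat) (v : Int) :
    (pvWrite g i j v).length = g.length := by simp [pvWrite]

theorem rowlen_pvWrite (g : List (List Int)) (i j : Nat) (v : Int) (a : Nat) :
    ((pvWrite g i j v).getD a []).length = (g.getD a []).length := by
  rw [getD_pvWrite]; split_ifs with h1
  · rw [← h1.1]; simp
  · rfl

-- writes lemmas
theorem writes_rotate (l : List ((Nat × Nat) × Int)) (x : (Nat × Nat) × Int) :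
    ∀ g, (∀ pv ∈ l, pv.1 ≠ x.1) → writes (l ++ [x]) g = writes (x :: l) g := by
  induction l with
  | nil => intro g _; rfl
  | cons p l ih =>
    intro g hx
    have hp : p.1 ≠ x.1 := hx p (by simp)
    calc writes ((p :: l) ++ [x]) g = writes (l ++ [x]) (pvWrite g p.1.1 p.1.2 p.2) := rfl
      _ = writes (x :: l) (pvWrite g p.1.1 p.1.2 p.2) := ih _ (fun pv h => hx pv (by simp [h]))
      _ = writes l (pvWrite (pvWrite g p.1.1 p.1.2 p.2) x.1.1 x.1.2 x.2) := rfl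
      _ = writes l (pvWrite (pvWrite g x.1.1 x.1.2 x.2) p.1.1 p.1.2 p.2) := by
            rw [pvWrite_comm _ _ _ _ _ hp]
      _ = writes (x :: p :: l) g := rfl

-- walk lemmas
theorem walk_append (ps qs : List (Nat × Nat)) :
    ∀ t g, walk (ps ++ qs) t g = walk qs (walk ps t g).2 (walk ps t g).1 := by
  induction ps with
  | nil => intro t g; rfl
  | cons p ps ih => intro t g; simp [walk, ih]

theorem walk_eq_writes :
    ∀ (ps : List (Nat × Nat)) (t : Int) (g : List (List Int)), ps.Nodup →
      walk ps t g = (writes (ps.zip (t :: (ps.dropLast.map (fun p => pvRead g p.1 p.2)))) g,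
                     (ps.map (fun p => pvRead g p.1 p.2)).getLastD t) := by
  intro ps
  induction ps with
  | nil => intro t g _; simp [walk, writes]
  | cons p ps ih =>
    intro t g hnd
    have hp : p ∉ ps := (List.nodup_cons.mp hnd).1
    have hnd' : ps.Nodup := (List.nodup_cons.mp hnd).2
    have hmap : ps.map (fun q => pvRead (pvWrite g p.1 p.2 t) q.1 q.2)
        = ps.map (fun q => pvRead g q.1 q.2) := by
      apply List.map_congr_left
      intro q hq
      exact pvRead_pvWrite_ne g q p t (by intro h; exact hp (h ▸ hq))
    have hmapd : ps.dropLast.map (fun q => pvRead (pvWrite g p.1 p.2 t) q.1 q.2)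
        = ps.dropLast.map (fun q => pvRead g q.1 q.2) := by
      apply List.map_congr_left
      intro q hq
      have hq' : q ∈ ps := (List.dropLast_sublist ps).mem hq
      exact pvRead_pvWrite_ne g q p t (by intro h; exact hp (h ▸ hq'))
    show walk ps (pvRead g p.1 p.2) (pvWrite g p.1 p.2 t) = _
    rw [ih (pvRead g p.1 p.2) (pvWrite g p.1 p.2 t) hnd', hmap, hmapd]
    cases ps with
    | nil => rfl
    | cons q ps' => rfl

-- loop bridges
theorem posR_succ (i j k : Nat) : posR i j (k+1) = (i, j+1) :: posR i (j+1) k := by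
  unfold posR
  rw [List.range_succ_eq_map, List.map_cons, List.map_map]
  refine congrArg₂ _ (by simp) (List.map_congr_left ?_)
  intro a _; simp [Nat.succ_eq_add_one]; omega

theorem posD_succ (i j k : Nat) : posD i j (k+1) = (i+1, j) :: posD (i+1) j k := by
  unfold posD
  rw [List.range_succ_eq_map, List.map_cons, List.map_map]
  refine congrArg₂ _ (by simp) (List.map_congr_left ?_)
  intro a _; simp [Nat.succ_eq_add_one]; omega

theorem posL_succ (i j k : Nat) : posL i j (k+1) = (i, j-1) :: posL i (j-1) k := by
  unfold posL
  rw [List.range_succ_eq_map, List.map_cons, List.map_map]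
  refine congrArg₂ _ (by simp) (List.map_congr_left ?_)
  intro a _; simp [Nat.succ_eq_add_one]; omega

theorem posU_succ (i j k : Nat) : posU i j (k+1) = (i-1, j) :: posU (i-1) j k := by
  unfold posU
  rw [List.range_succ_eq_map, List.map_cons, List.map_map]
  refine congrArg₂ _ (by simp) (List.map_congr_left ?_)
  intro a _; simp [Nat.succ_eq_add_one]; omega

theorem goRight_eq (k : Nat) : ∀ (g : List (List Int)) (i j : Nat) (t : Int),
    goRight k (g, i, j, t) = ((walk (posR i j k) t g).1, i, j + k, (walk (posR i j k) t g).2) := by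
  induction k with
  | zero => intro g i j t; simp [goRight, posR, walk]
  | succ k ih =>
    intro g i j t
    rw [posR_succ]
    show goRight k (pvWrite g i (j+1) t, i, j+1, pvRead g i (j+1)) = _
    rw [ih]
    simp [walk]; omega

theorem goDown_eq (k : Nat) : ∀ (g : List (List Int)) (i j : Nat) (t : Int),
    goDown k (g, i, j, t) = ((walk (posD i j k) t g).1, i + k, j, (walk (posD i j k) t g).2) := by
  induction k with
  | zero => intro g i j t; simp [goDown, posD, walk]
  | succ k ih =>
    intro g i j t
    rw [posD_succ]
    show goDown k (pvWrite g (i+1) j t, i+1, j, pvRead g (i+1) j) = _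
    rw [ih]
    simp [walk]; omega

theorem goLeft_eq (k : Nat) : ∀ (g : List (List Int)) (i j : Nat) (t : Int),
    goLeft k (g, i, j, t) = ((walk (posL i j k) t g).1, i, j - k, (walk (posL i j k) t g).2) := by
  induction k with
  | zero => intro g i j t; simp [goLeft, posL, walk]
  | succ k ih =>
    intro g i j t
    rw [posL_succ]
    show goLeft k (pvWrite g i (j-1) t, i, j-1, pvRead g i (j-1)) = _
    rw [ih]
    simp [walk]; omega

theorem goUp_eq (k : Nat) : ∀ (g : List (List Int)) (i j : Nat) (t : Int),
    goUp k (g, i, j, t) = ((walk (posU i j k) t g).1, i - k, j, (walk (posU i j k) t g).2) := by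
  induction k with
  | zero => intro g i j t; simp [goUp, posU, walk]
  | succ k ih =>
    intro g i j t
    rw [posU_succ]
    show goUp k (pvWrite g (i-1) j t, i-1, j, pvRead g (i-1) j) = _
    rw [ih]
    simp [walk]; omega

theorem rotateA_walk (n m : Nat) (g : List (List Int)) :
    rotateA n m g = (walk (pathA n m) (pvRead g 0 0) g).1 := by
  simp only [rotateA, goRight_eq, goDown_eq, goLeft_eq, goUp_eq, Nat.zero_add, Nat.sub_self]
  rw [pathA, walk_append, walk_append, walk_append]

-- range reversal
theorem reverse_range (k : Nat) : (List.range k).reverse = (List.range k).map (fun d => k - 1 - d) := by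
  induction k with
  | zero => rfl
  | succ k ih =>
    conv_lhs => rw [List.range_succ]
    rw [List.reverse_append, List.reverse_singleton, ih, List.range_succ_eq_map,
        List.map_cons, List.map_map]
    simp only [List.singleton_append]
    refine congrArg₂ _ (by omega) (List.map_congr_left ?_)
    intro a ha
    have := List.mem_range.mp ha
    simp [Nat.succ_eq_add_one]
    omega

-- ring head/tail decomposition (m ≥ 1)
theorem ringB_cons (n m : Nat) (hm : 1 ≤ m) : ringB n m = ((0 : Nat), (0 : Nat)) :: tailB n m := by
  obtain ⟨m', rfl⟩ : ∃ m', m = m' + 1 := ⟨m - 1, by omega⟩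
  unfold ringB tailB
  rw [List.range_succ_eq_map]
  simp only [List.map_cons, List.map_map, Nat.add_sub_cancel, List.cons_append]
  refine congrArg _ ?_
  refine congrArg₂ _ (congrArg₂ _ (congrArg₂ _ (List.map_congr_left ?_) rfl) rfl) rfl
  intro a _; exact Prod.ext rfl (by simp [Nat.succ_eq_add_one])

theorem pathA_eq_main (n m : Nat) (hn : 2 ≤ n) (hm : 2 ≤ m) :
    pathA n m = tailB n m ++ [((0 : Nat), (0 : Nat))] := by
  unfold pathA tailB
  rw [if_pos (by omega : 1 < n), if_pos (by omega : 1 < m)]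
  have e1 : posR 0 0 (m-1) = (List.range (m-1)).map (fun j => ((0 : Nat), j+1)) := by
    unfold posR
    exact List.map_congr_left (by intro a _; exact Prod.ext rfl (by omega))
  have e2 : posD 0 (m-1) (n-1) = (List.range (n-1)).map (fun i => (i+1, m-1)) := by
    unfold posD
    exact List.map_congr_left (by intro a _; exact Prod.ext (by omega) rfl)
  have e3 : posL (n-1) (m-1) (m-1) = ((List.range (m-1)).reverse).map (fun j => (n-1, j)) := by
    rw [reverse_range, List.map_map]; unfold posL
    exact List.map_congr_left (by intro a _; exact Prod.ext rfl rfl)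
  have e4 : posU (n-1) 0 (n-1)
      = (((List.range (n-2)).map (fun i => i+1)).reverse).map (fun i => (i, (0 : Nat)))
        ++ [((0:Nat),(0:Nat))] := by
    unfold posU
    rw [show n - 1 = (n-2)+1 from by omega]
    rw [List.range_succ, List.map_append]
    rw [← List.map_reverse, reverse_range, List.map_map, List.map_map]
    refine congrArg₂ _ (List.map_congr_left ?_) ?_
    · intro a ha
      have := List.mem_range.mp ha
      exact Prod.ext (by simp; omega) rfl
    · simp
  rw [e1, e2, e3, e4]
  simp [List.append_assoc]

theorem nodup_ringB_main (n m : Nat) (hn : 2 ≤ n) (hm : 2 ≤ m) : (ringB n m).Nodup := by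
  unfold ringB
  rw [if_pos (by omega : 1 < n), if_pos (by omega : 1 < m)]
  simp only [List.nodup_append, List.mem_append, List.mem_map, List.mem_range,
    List.mem_reverse]
  repeat' apply And.intro
  case left.left.left =>
    exact List.Nodup.map (by intro a b hab; simpa using hab) List.nodup_range
  case left.left.right.left =>
    exact List.Nodup.map
      (by intro a b hab; simp only [Prod.mk.injEq] at hab; omega) List.nodup_range
  case left.left.right.right =>
    rintro x ⟨a, ha, rfl⟩ y ⟨b, hb, rfl⟩
    simp only [ne_eq, Prod.mk.injEq, not_and]; omega
  case left.right.left =>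
    exact List.Nodup.map
      (by intro a b hab; simp only [Prod.mk.injEq] at hab; omega)
      (List.nodup_reverse.mpr List.nodup_range)
  case left.right.right =>
    rintro x (⟨a, ha, rfl⟩ | ⟨a, ha, rfl⟩) y ⟨b, hb, rfl⟩ <;>
      (simp only [ne_eq, Prod.mk.injEq, not_and]; omega)
  case right.left =>
    refine List.Nodup.map
      (by intro a b hab; simp only [Prod.mk.injEq] at hab; omega)
      (List.nodup_reverse.mpr (List.Nodup.map (by intro a b hab; simpa using hab) List.nodup_range))
  case right.right =>
    rintro x ((⟨a, ha, rfl⟩ | ⟨a, ha, rfl⟩) | ⟨a, ha, rfl⟩) y ⟨b, ⟨c, hc, rfl⟩, rfl⟩ <;>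
      (simp only [ne_eq, Prod.mk.injEq, not_and]; omega)

-- list tail/last helpers
theorem drop_len_sub_one {α : Type} (d : α) :
    ∀ (l : List α), l ≠ [] → l.drop (l.length - 1) = [l.getLastD d] := by
  intro l
  induction l with
  | nil => intro h; exact absurd rfl h
  | cons a l ih =>
    intro _
    cases l with
    | nil => rfl
    | cons b l' =>
      have := ih (by simp)
      simpa [List.getLastD_cons] using this

theorem dropLast_append_getLastD {α : Type} (d : α) :
    ∀ (l : List α), l ≠ [] → l.dropLast ++ [l.getLastD d] = l := by
  intro l
  induction l with
  | nil => intro h; exact absurd rfl h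
  | cons a l ih =>
    intro _
    cases l with
    | nil => rfl
    | cons b l' => simpa [List.getLastD_cons] using ih (by simp)

theorem dropLast_cons_ne {α : Type} (a : α) (l : List α) (h : l ≠ []) :
    (a :: l).dropLast = a :: l.dropLast := by
  cases l with
  | nil => exact absurd rfl h
  | cons b l' => rfl

theorem getLastD_mem {α : Type} (d : α) :
    ∀ (l : List α), l ≠ [] → l.getLastD d ∈ l := by
  intro l
  induction l with
  | nil => intro h; exact absurd rfl h
  | cons a l ih =>
    intro _
    cases l with
    | nil => simp
    | cons b l' =>
      rw [List.getLastD_cons]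
      exact List.mem_cons_of_mem _ (ih (by simp))

-- the central per-operation equality: A's swap walk = B's ring rotation
theorem rotB_writes (ring : List (Nat × Nat)) (g : List (List Int)) :
    rotB ring g = writes (ring.zip
      (((ring.map (fun p => pvRead g p.1 p.2)).drop ((ring.map (fun p => pvRead g p.1 p.2)).length - 1))
        ++ (ring.map (fun p => pvRead g p.1 p.2)).dropLast)) g := rfl

theorem rot_eq (n m : Nat) (g : List (List Int))
    (hcons : ringB n m = ((0 : Nat), (0 : Nat)) :: tailB n m)
    (hpath : pathA n m = tailB n m ++ [((0 : Nat), (0 : Nat))])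
    (hnd : (ringB n m).Nodup)
    (hne : tailB n m ≠ []) :
    rotateA n m g = rotB (ringB n m) g := by
  have hnd' : (((0 : Nat), (0 : Nat)) :: tailB n m).Nodup := hcons ▸ hnd
  have h00 : ((0 : Nat), (0 : Nat)) ∉ tailB n m := (List.nodup_cons.mp hnd').1
  have hndtb : (tailB n m).Nodup := (List.nodup_cons.mp hnd').2
  have hndpath : (pathA n m).Nodup := by
    rw [hpath]
    refine List.Nodup.append hndtb (List.nodup_singleton _) ?_
    intro a ha hb
    simp only [List.mem_singleton] at hb
    exact h00 (hb ▸ ha)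
  have hvl : (tailB n m).map (fun p => pvRead g p.1 p.2) ≠ [] := by simpa using hne
  rw [rotateA_walk, walk_eq_writes _ _ _ hndpath]
  show writes ((pathA n m).zip
      (pvRead g 0 0 :: (pathA n m).dropLast.map (fun p => pvRead g p.1 p.2))) g
    = rotB (ringB n m) g
  rw [rotB_writes, hcons, hpath, List.dropLast_concat, List.map_cons]
  set r00 := pvRead g 0 0 with hr00
  set vl := (tailB n m).map (fun p => pvRead g p.1 p.2) with hvldef
  have hlv : ((r00 :: vl).length - 1) = vl.length := by simp
  have hdrop : (r00 :: vl).drop vl.length = [vl.getLastD r00] := by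
    have h := drop_len_sub_one (0 : Int) (r00 :: vl) (by simp)
    rw [hlv] at h
    rw [h, List.getLastD_cons]
  have hdl : (r00 :: vl).dropLast = r00 :: vl.dropLast := dropLast_cons_ne _ _ hvl
  rw [hlv, hdrop, hdl]
  have hsplit : r00 :: vl = (r00 :: vl.dropLast) ++ [vl.getLastD r00] := by
    rw [List.cons_append, dropLast_append_getLastD r00 vl hvl]
  have htblen : 1 ≤ (tailB n m).length := by
    cases h : tailB n m with
    | nil => exact absurd h hne
    | cons a l => simp
  have hlens : (tailB n m).length = (r00 :: vl.dropLast).length := by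
    simp [hvldef, List.length_dropLast]
    omega
  rw [hsplit, List.zip_append hlens]
  simp only [List.zip_nil_right, List.singleton_append, List.zip_cons_cons]
  exact writes_rotate _ _ g (by
    intro pv hpv
    obtain ⟨p, v⟩ := pv
    have hp := (List.of_mem_zip hpv).1
    intro h
    simp only at h
    exact h00 (h ▸ hp))

-- the 1×1 case: both rotations are the identity
theorem pvWrite_self (g : List (List Int)) (i j : Nat)
    (hi : i < g.length) (hj : j < (g.getD i []).length) :
    pvWrite g i j (pvRead g i j) = g := by
  unfold pvWrite pvRead
  have hrow : g.getD i [] = g[i] := List.getD_eq_getElem g [] hi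
  rw [hrow] at hj ⊢
  rw [List.getD_eq_getElem g[i] 0 hj, List.set_getElem_self, List.set_getElem_self]

theorem rot_eq_11 (g : List (List Int))
    (hi : 0 < g.length) (hj : 0 < (g.getD 0 []).length) :
    rotateA 1 1 g = rotB (ringB 1 1) g := by
  have h1 : rotateA 1 1 g = g := rfl
  have h2 : rotB (ringB 1 1) g = pvWrite g 0 0 (pvRead g 0 0) := rfl
  rw [h1, h2, pvWrite_self g 0 0 hi hj]

-- shape preservation
theorem length_walk : ∀ (ps : List (Nat × Nat)) (t : Int) (g : List (List Int)),
    ((walk ps t g).1).length = g.length := by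
  intro ps
  induction ps with
  | nil => intro t g; rfl
  | cons p ps ih => intro t g; rw [walk, ih, length_pvWrite]

theorem rowlen_walk : ∀ (ps : List (Nat × Nat)) (t : Int) (g : List (List Int)) (a : Nat),
    (((walk ps t g).1).getD a []).length = ((g.getD a []).length) := by
  intro ps
  induction ps with
  | nil => intro t g a; rfl
  | cons p ps ih => intro t g a; rw [walk, ih, rowlen_pvWrite]

theorem rows_rotateA (n m mm : Nat) (g : List (List Int))
    (hrows : ∀ r ∈ g, mm ≤ r.length) : ∀ r ∈ rotateA n m g, mm ≤ r.length := by
  intro r hr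
  rw [rotateA_walk] at hr
  obtain ⟨i, hi, rfl⟩ := List.mem_iff_getElem.mp hr
  have hlen := length_walk (pathA n m) (pvRead g 0 0) g
  have hi' : i < g.length := by omega
  have h1 : ((walk (pathA n m) (pvRead g 0 0) g).1).getD i []
      = (walk (pathA n m) (pvRead g 0 0) g).1[i] := List.getD_eq_getElem _ [] hi
  have h2 := rowlen_walk (pathA n m) (pvRead g 0 0) g i
  rw [h1] at h2
  rw [h2, List.getD_eq_getElem g [] hi']
  exact hrows _ (List.getElem_mem hi')

theorem len_rotateA (n m : Nat) (g : List (List Int)) :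
    (rotateA n m g).length = g.length := by
  rw [rotateA_walk]; exact length_walk _ _ _

-- ShiftRow
theorem shift_eq (g : List (List Int)) (h : g ≠ []) :
    shiftRowA g = g.drop (g.length - 1) ++ g.dropLast := by
  rw [drop_len_sub_one [] g h, shiftRowA, List.singleton_append]

theorem shift_len (g : List (List Int)) (h : g ≠ []) :
    (shiftRowA g).length = g.length := by
  have h1 : 0 < g.length := List.length_pos_of_ne_nil h
  simp [shiftRowA, List.length_dropLast]
  omega

theorem shift_rows (g : List (List Int)) (mm : Nat) (h : g ≠ [])
    (hrows : ∀ r ∈ g, mm ≤ r.length) : ∀ r ∈ shiftRowA g, mm ≤ r.length := by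
  intro r hr
  rw [shiftRowA] at hr
  rcases List.mem_cons.mp hr with h1 | h1
  · exact hrows _ (h1 ▸ getLastD_mem [] g h)
  · exact hrows _ ((List.dropLast_sublist g).mem h1)

-- fold equality
theorem fold_eq (n m : Nat) (hn : 1 ≤ n)
    (hrot : ∀ g : List (List Int), g.length = n → (∀ r ∈ g, m ≤ r.length) →
      rotateA n m g = rotB (ringB n m) g) :
    ∀ (ops : List String) (g : List (List Int)), g.length = n → (∀ r ∈ g, m ≤ r.length) →
      ops.foldl (fun g op => if op = "Rotate" then rotateA n m g
        else if op = "ShiftRow" then shiftRowA g else g) g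
      = ops.foldl (fun g op => if op = "Rotate" then rotB (ringB n m) g
        else if op = "ShiftRow" then g.drop (g.length - 1) ++ g.dropLast else g) g := by
  intro ops
  induction ops with
  | nil => intro g _ _; rfl
  | cons op ops ih =>
    intro g hlen hrows
    simp only [List.foldl_cons]
    by_cases hR : op = "Rotate"
    · rw [if_pos hR, if_pos hR, ← hrot g hlen hrows]
      exact ih _ ((len_rotateA n m g).trans hlen) (rows_rotateA n m m g hrows)
    · rw [if_neg hR, if_neg hR]
      by_cases hS : op = "ShiftRow"
      · have hne : g ≠ [] := by intro hh; rw [hh] at hlen; simp at hlen; omega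
        rw [if_pos hS, if_pos hS, ← shift_eq g hne]
        exact ih _ ((shift_len g hne).trans hlen) (shift_rows g m hne hrows)
      · rw [if_neg hS, if_neg hS]
        exact ih g hlen hrows

theorem fold_noRot (n m : Nat) :
    ∀ (ops : List String), "Rotate" ∉ ops → ∀ (g : List (List Int)), g ≠ [] →
      ops.foldl (fun g op => if op = "Rotate" then rotateA n m g
        else if op = "ShiftRow" then shiftRowA g else g) g
      = ops.foldl (fun g op => if op = "Rotate" then rotB (ringB n m) g
        else if op = "ShiftRow" then g.drop (g.length - 1) ++ g.dropLast else g) g := by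
  intro ops
  induction ops with
  | nil => intro _ g _; rfl
  | cons op ops ih =>
    intro hR g hne
    have hR1 : op ≠ "Rotate" := fun h => hR (by simp [h])
    have hR2 : "Rotate" ∉ ops := fun h => hR (by simp [h])
    simp only [List.foldl_cons, if_neg hR1]
    by_cases hS : op = "ShiftRow"
    · rw [if_pos hS, if_pos hS, ← shift_eq g hne]
      exact ih hR2 _ (by rw [shiftRowA]; simp)
    · rw [if_neg hS, if_neg hS]
      exact ih hR2 g hne

-- small-shape facts
theorem tailB_ne_main (n m : Nat) (hm : 2 ≤ m) : tailB n m ≠ [] := by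
  intro h
  have := congrArg List.length h
  simp [tailB] at this
  omega

-- ===== VERDICT (by name: the statement is the Claim_ definition above) =====
theorem solution_spec : Claim_equal_solution := by
  intro rc ops hdom hpre
  obtain ⟨hne, hrot⟩ := hpre
  show solution rc ops = solution_alt rc ops
  simp only [solution, solution_alt]
  have hn : 1 ≤ rc.length := List.length_pos_of_ne_nil hne
  by_cases hR : "Rotate" ∈ ops
  · obtain ⟨hm, hrows, hd1, hd2⟩ := hrot hR
    refine fold_eq rc.length (rc.headD []).length hn ?_ ops rc rfl hrows
    intro g hlen hrowsg
    by_cases h1 : rc.length = 1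
    · by_cases hm1 : (rc.headD []).length = 1
      · rw [h1, hm1]
        have hg : 0 < g.length := by omega
        refine rot_eq_11 g hg ?_
        have hmem : g.getD 0 [] ∈ g := by
          rw [List.getD_eq_getElem g [] hg]; exact List.getElem_mem hg
        have := hrowsg _ hmem
        omega
      · have hm2 : (rc.headD []).length = 2 := by omega
        rw [h1, hm2]
        exact rot_eq 1 2 g (ringB_cons 1 2 (by omega)) (by decide) (by decide) (by decide)
    · by_cases hm1 : (rc.headD []).length = 1
      · have hn2 : rc.length = 2 := by omega
        rw [hn2, hm1]
        exact rot_eq 2 1 g (ringB_cons 2 1 (by omega)) (by decide) (by decide) (by decide)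
      · exact rot_eq rc.length (rc.headD []).length g
          (ringB_cons _ _ (by omega))
          (pathA_eq_main _ _ (by omega) (by omega))
          (nodup_ringB_main _ _ (by omega) (by omega))
          (tailB_ne_main _ _ (by omega))
  · exact fold_noRot rc.length (rc.headD []).length ops hR rc hne
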